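-- pv_equiv track=rewrite | github.com/john35452/GFG_Weekly_Coding_Contest | gfg-weekly-coding-contest-118/Explosives.py | maxBoxes
-- ===== SOURCE A (Python) =====
-- from typing import List
--
-- def maxBoxes(N : int, K : int , C : int, col : List[int]):
--     # code here
--     ans = 0
--     for i in range(N):
--         if col[i] == C:
--             l = r = i
--             start = 1
--             total = 0
--             count = 1
--             while l >= 0 and r < N and col[l] == col[r]:
--                 target = col[l]
--                 while l > 0 and col[l - 1] == target:
--                     l -= 1
--                     count += 1
--                 while r + 1 < N and col[r + 1] == target:
--                     r += 1
--                     count += 1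
--                 if count >= 3 - start:
--                     total += count
--                 else:
--                     break
--                 start = 0
--                 count = 2
--                 l -= 1
--                 r += 1
--             ans = max(ans, total)
--     return ans
-- ===== SOURCE B (Python) =====
-- from typing import List
--
-- def maxBoxes(N: int, K: int, C: int, col: List[int]):
--     # Run-length encode the first N colors, then expand over whole runs per center run
--     cs = col[:max(N, 0)]
--     blocks = []
--     cur = 0
--     cnt = 0
--     for x in cs:
--         if cnt > 0 and cur == x:
--             cnt += 1
--         else:
--             if cnt > 0:
--                 blocks.append((cur, cnt))
--             cur = x
--             cnt = 1
--     if cnt > 0: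
--         blocks.append((cur, cnt))
--     M = len(blocks)
--     ans = 0
--     for j in range(M):
--         c, ln = blocks[j]
--         if c == C and ln >= 2:
--             total = ln
--             a, b = j - 1, j + 1
--             while a >= 0 and b < M and blocks[a][0] == blocks[b][0] and blocks[a][1] + blocks[b][1] >= 3:
--                 total += blocks[a][1] + blocks[b][1]
--                 a -= 1
--                 b += 1
--             ans = max(ans, total)
--     return ans
-- ===== Notes on version B (the rewrite author's own statement) =====
-- stated objective: alternative
-- what changed: Replaces A's per-index symmetric character-by-character expansion with a single run-length encoding pass followed by one expansion per run that jumps whole runs instead of scanning characters.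
import Mathlib
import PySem

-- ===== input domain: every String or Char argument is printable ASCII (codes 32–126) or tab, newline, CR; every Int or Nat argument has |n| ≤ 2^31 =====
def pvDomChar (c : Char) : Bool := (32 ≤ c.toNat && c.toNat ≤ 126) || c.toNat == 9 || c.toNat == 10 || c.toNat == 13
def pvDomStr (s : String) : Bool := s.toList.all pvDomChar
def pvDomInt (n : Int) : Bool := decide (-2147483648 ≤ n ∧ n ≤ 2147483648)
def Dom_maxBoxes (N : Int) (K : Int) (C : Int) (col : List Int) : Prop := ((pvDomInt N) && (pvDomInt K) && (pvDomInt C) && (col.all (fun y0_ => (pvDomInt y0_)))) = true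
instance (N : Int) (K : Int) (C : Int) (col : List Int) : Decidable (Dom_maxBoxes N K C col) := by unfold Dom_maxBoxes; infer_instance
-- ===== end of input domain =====

-- B replaces A's per-index character-by-character symmetric expansion with one
-- run-length encoding pass and a per-run expansion that jumps whole runs (alternative algorithm).

-- ===== PORT A =====
-- inner 'while l > 0 and col[l-1] == target' of A
def pvAL (cs : List Int) (target : Int) (l count : Int) : Int × Int :=
  if h : 0 < l ∧ PySem.List.pyGetD cs (l - 1) 0 = target then
    pvAL cs target (l - 1) (count + 1)
  else (l, count)
termination_by l.toNat
decreasing_by omega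

theorem pvAL_fst_le (cs : List Int) (t l c : Int) : (pvAL cs t l c).1 ≤ l := by
  fun_induction pvAL cs t l c with
  | case1 l c h ih => omega
  | case2 l c h => simp

-- inner 'while r + 1 < N and col[r+1] == target' of A
def pvAR (cs : List Int) (N target : Int) (r count : Int) : Int × Int :=
  if h : r + 1 < N ∧ PySem.List.pyGetD cs (r + 1) 0 = target then
    pvAR cs N target (r + 1) (count + 1)
  else (r, count)
termination_by (N - r).toNat
decreasing_by omega

-- outer 'while l >= 0 and r < N and col[l] == col[r]' of A
def pvAW (cs : List Int) (N l r start total count : Int) : Int :=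
  if h : 0 ≤ l ∧ r < N ∧ PySem.List.pyGetD cs l 0 = PySem.List.pyGetD cs r 0 then
    let target := PySem.List.pyGetD cs l 0
    let p := pvAL cs target l count
    let q := pvAR cs N target r p.2
    if 3 - start ≤ q.2 then
      pvAW cs N (p.1 - 1) (q.1 + 1) 0 (total + q.2) 2
    else total
  else total
termination_by (l + 1).toNat
decreasing_by
  have := pvAL_fst_le cs (PySem.List.pyGetD cs l 0) l count
  omega

def maxBoxes (N : Int) (K : Int) (C : Int) (col : List Int) : Int :=
  (PySem.List.pyRange 0 N 1).foldl
    (fun ans i =>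
      if PySem.List.pyGetD col i 0 = C then
        max ans (pvAW col N i i 1 0 1)
      else ans) 0

-- ===== PORT B =====
-- one step of B's run-length-encoding loop (state: blocks so far, current color, current count)
def pvRLEStep (acc : List (Int × Int) × Int × Int) (x : Int) : List (Int × Int) × Int × Int :=
  if 0 < acc.2.2 ∧ acc.2.1 = x then (acc.1, acc.2.1, acc.2.2 + 1)
  else ((if 0 < acc.2.2 then acc.1 ++ [(acc.2.1, acc.2.2)] else acc.1), x, 1)

-- B's 'while a >= 0 and b < M and ...' expansion over whole runs
def pvBW (blocks : List (Int × Int)) (M a b total : Int) : Int :=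
  if h : 0 ≤ a ∧ b < M ∧
      (PySem.List.pyGetD blocks a (0, 0)).1 = (PySem.List.pyGetD blocks b (0, 0)).1 ∧
      3 ≤ (PySem.List.pyGetD blocks a (0, 0)).2 + (PySem.List.pyGetD blocks b (0, 0)).2 then
    pvBW blocks M (a - 1) (b + 1)
      (total + ((PySem.List.pyGetD blocks a (0, 0)).2 + (PySem.List.pyGetD blocks b (0, 0)).2))
  else total
termination_by (a + 1).toNat
decreasing_by omega

def maxBoxes_alt (N : Int) (K : Int) (C : Int) (col : List Int) : Int :=
  let cs := PySem.List.slice col none (some (max N 0))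
  let st := cs.foldl pvRLEStep ([], 0, 0)
  let blocks := if 0 < st.2.2 then st.1 ++ [(st.2.1, st.2.2)] else st.1
  let M : Int := blocks.length
  (PySem.List.pyRange 0 M 1).foldl
    (fun ans j =>
      let p := PySem.List.pyGetD blocks j (0, 0)
      if p.1 = C ∧ 2 ≤ p.2 then max ans (pvBW blocks M (j - 1) (j + 1) p.2) else ans) 0

-- ===== PRECONDITION & SPEC =====
-- Pre_ excludes exactly the inputs where A raises IndexError: N larger than len(col).
def Pre_maxBoxes (N : Int) (K : Int) (C : Int) (col : List Int) : Prop :=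
  N ≤ (col.length : Int)
instance (N : Int) (K : Int) (C : Int) (col : List Int) : Decidable (Pre_maxBoxes N K C col) := by
  unfold Pre_maxBoxes; infer_instance

def pvWitness_maxBoxes : Int × Int × Int × List Int := (4, 2, 1, [2, 1, 1, 2])

def Spec_maxBoxes (N : Int) (K : Int) (C : Int) (col : List Int) (out : Int) : Prop := out = maxBoxes_alt N K C col
instance (N : Int) (K : Int) (C : Int) (col : List Int) (out : Int) : Decidable (Spec_maxBoxes N K C col out) := by unfold Spec_maxBoxes; infer_instance

-- ===== CLAIM (what is proved, stated in full; the proofs are below) =====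
def Claim_equal_maxBoxes : Prop := ∀ (N : Int) (K : Int) (C : Int) (col : List Int), Dom_maxBoxes N K C col → Pre_maxBoxes N K C col → Spec_maxBoxes N K C col (maxBoxes N K C col)

-- ===== LEMMAS AND PROOFS =====
-- ===== spec-side definitions =====
def pvFlat (bs : List (Int × Int)) : List Int := bs.flatMap (fun p => List.replicate p.2.toNat p.1)

def pvPref (bs : List (Int × Int)) (j : Nat) : Int := ((bs.take j).map (fun p => p.2)).sum

def pvGo (c k : Int) : List Int → List (Int × Int)
  | [] => [(c, k)]
  | x :: xs => if c = x then pvGo c (k + 1) xs else (c, k) :: pvGo x 1 xs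

def pvRLE : List Int → List (Int × Int)
  | [] => []
  | x :: xs => pvGo x 1 xs

theorem pvPyGetD_toNat {α : Type} (xs : List α) (i : Int) (d : α) (h : 0 ≤ i) :
    PySem.List.pyGetD xs i d = xs.getD i.toNat d := by
  have hi : i = ((i.toNat : Nat) : Int) := by omega
  conv_lhs => rw [hi]
  rw [PySem.List.pyGetD_natCast]

theorem pvRLE_foldl (xs : List Int) : ∀ (done : List (Int × Int)) (c k : Int), 0 < k →
    (let st := xs.foldl pvRLEStep (done, c, k);
     if 0 < st.2.2 then st.1 ++ [(st.2.1, st.2.2)] else st.1) = done ++ pvGo c k xs := by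
  induction xs with
  | nil => intro done c k hk; simp [pvGo, hk]
  | cons x xs ih =>
    intro done c k hk
    simp only [List.foldl_cons]
    by_cases hcx : c = x
    · have hstep : pvRLEStep (done, c, k) x = (done, c, k + 1) := by
        simp [pvRLEStep, hk, hcx]
      rw [hstep]
      have := ih done c (k + 1) (by omega)
      simp only [this, pvGo, if_pos hcx]
    · have hstep : pvRLEStep (done, c, k) x = (done ++ [(c, k)], x, 1) := by
        simp [pvRLEStep, hk, hcx]
      rw [hstep]
      have := ih (done ++ [(c, k)]) x 1 (by omega)
      simp only [this, pvGo, if_neg hcx, List.append_assoc, List.singleton_append]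

theorem pvBlocks_eq (cs : List Int) :
    (let st := cs.foldl pvRLEStep ([], 0, 0);
     if 0 < st.2.2 then st.1 ++ [(st.2.1, st.2.2)] else st.1) = pvRLE cs := by
  cases cs with
  | nil => simp [pvRLE]
  | cons x xs =>
    simp only [List.foldl_cons]
    have hstep : pvRLEStep ([], 0, 0) x = ([], x, 1) := by simp [pvRLEStep]
    rw [hstep]
    have := pvRLE_foldl xs [] x 1 (by omega)
    simpa [pvRLE] using this

theorem pvGo_flat (xs : List Int) : ∀ (c k : Int), 0 ≤ k →
    pvFlat (pvGo c k xs) = List.replicate k.toNat c ++ xs := by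
  induction xs with
  | nil => intro c k hk; simp [pvGo, pvFlat]
  | cons x xs ih =>
    intro c k hk
    by_cases hcx : c = x
    · rw [pvGo, if_pos hcx, ih c (k + 1) (by omega)]
      have : (k + 1).toNat = k.toNat + 1 := by omega
      rw [this, List.replicate_succ', hcx]
      simp
    · rw [pvGo, if_neg hcx]
      have : pvFlat ((c, k) :: pvGo x 1 xs) = List.replicate k.toNat c ++ pvFlat (pvGo x 1 xs) := by
        simp [pvFlat]
      rw [this, ih x 1 (by omega)]
      simp []

theorem pvGo_pos (xs : List Int) : ∀ (c k : Int), 0 < k → ∀ p ∈ pvGo c k xs, 0 < p.2 := by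
  induction xs with
  | nil => intro c k hk p hp; simp [pvGo] at hp; subst hp; exact hk
  | cons x xs ih =>
    intro c k hk p hp
    by_cases hcx : c = x
    · rw [pvGo, if_pos hcx] at hp; exact ih c (k + 1) (by omega) p hp
    · rw [pvGo, if_neg hcx] at hp
      rcases List.mem_cons.mp hp with h | h
      · subst h; exact hk
      · exact ih x 1 (by omega) p h

theorem pvGo_head (xs : List Int) : ∀ (c k : Int), ∃ k' t, pvGo c k xs = (c, k') :: t := by
  induction xs with
  | nil => intro c k; exact ⟨k, [], rfl⟩
  | cons x xs ih =>
    intro c k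
    by_cases hcx : c = x
    · rw [pvGo, if_pos hcx]; exact ih c (k + 1)
    · rw [pvGo, if_neg hcx]; exact ⟨k, _, rfl⟩

theorem pvGo_chain (xs : List Int) : ∀ (c k : Int),
    List.IsChain (fun p q : Int × Int => p.1 ≠ q.1) (pvGo c k xs) := by
  induction xs with
  | nil => intro c k; simp [pvGo]
  | cons x xs ih =>
    intro c k
    by_cases hcx : c = x
    · rw [pvGo, if_pos hcx]; exact ih c (k + 1)
    · rw [pvGo, if_neg hcx]
      rw [List.isChain_cons]
      refine ⟨?_, ih x 1⟩
      intro b hb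
      obtain ⟨k', t, hgo⟩ := pvGo_head xs x 1
      rw [hgo] at hb
      simp only [List.head?_cons, Option.mem_some_iff] at hb
      rw [← hb]
      simpa using hcx

theorem pvPref_zero (bs : List (Int × Int)) : pvPref bs 0 = 0 := by simp [pvPref]

theorem pvPref_succ (bs : List (Int × Int)) (j : Nat) (hj : j < bs.length) :
    pvPref bs (j + 1) = pvPref bs j + (bs.getD j (0, 0)).2 := by
  have h : List.take (j + 1) (List.map (fun p : Int × Int => p.2) bs)
      = List.take j (List.map (fun p : Int × Int => p.2) bs) ++ [bs[j].2] := by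
    rw [List.take_add_one]
    have : (List.map (fun p : Int × Int => p.2) bs)[j]? = some bs[j].2 := by
      rw [List.getElem?_map, List.getElem?_eq_getElem hj]; rfl
    rw [this]; rfl
  unfold pvPref
  rw [List.map_take, List.map_take, h, List.sum_append, List.getD_eq_getElem bs (0, 0) hj]
  simp

theorem pvPref_nonneg (bs : List (Int × Int)) (hpos : ∀ p ∈ bs, 0 < p.2) (j : Nat) :
    0 ≤ pvPref bs j := by
  unfold pvPref
  apply List.sum_nonneg
  intro x hx
  simp only [List.mem_map] at hx
  obtain ⟨p, hp, rfl⟩ := hx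
  exact le_of_lt (hpos p (List.mem_of_mem_take hp))

theorem pvPref_mono (bs : List (Int × Int)) (hpos : ∀ p ∈ bs, 0 < p.2) :
    ∀ (j j' : Nat), j ≤ j' → j' ≤ bs.length → pvPref bs j ≤ pvPref bs j' := by
  intro j j' hle hj'
  induction j' with
  | zero =>
    have hj0 : j = 0 := by omega
    subst hj0; exact le_refl _
  | succ j' ih =>
    rcases Nat.lt_or_ge j (j' + 1) with h | h
    · have h1 := ih (by omega) (by omega)
      have h2 : 0 < (bs.getD j' (0, 0)).2 := by
        have hg : bs.getD j' (0, 0) = bs[j'] := List.getD_eq_getElem bs (0, 0) (by omega)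
        rw [hg]; exact hpos _ (List.getElem_mem _)
      rw [pvPref_succ bs j' (by omega)]
      omega
    · have hj1 : j = j' + 1 := by omega
      subst hj1; exact le_refl _

theorem pvFlat_length (bs : List (Int × Int)) (hpos : ∀ p ∈ bs, 0 < p.2) :
    ((pvFlat bs).length : Int) = pvPref bs bs.length := by
  induction bs with
  | nil => simp [pvFlat, pvPref]
  | cons p t ih =>
    have hp : 0 < p.2 := hpos p (by simp)
    have ht : ∀ q ∈ t, 0 < q.2 := fun q hq => hpos q (by simp [hq])
    have h1 : pvFlat (p :: t) = List.replicate p.2.toNat p.1 ++ pvFlat t := by simp [pvFlat]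
    have h2 : pvPref (p :: t) (p :: t).length = p.2 + pvPref t t.length := by
      simp [pvPref]
    rw [h1, h2, List.length_append, List.length_replicate]
    push_cast
    rw [ih ht]
    omega

theorem pvPref_cons (p : Int × Int) (t : List (Int × Int)) (j : Nat) :
    pvPref (p :: t) (j + 1) = p.2 + pvPref t j := by
  simp [pvPref, List.take_succ_cons]

theorem pvPosColor (bs : List (Int × Int)) (hpos : ∀ p ∈ bs, 0 < p.2) :
    ∀ (j : Nat), j < bs.length → ∀ i : Int, pvPref bs j ≤ i → i < pvPref bs (j + 1) →
      PySem.List.pyGetD (pvFlat bs) i 0 = (bs.getD j (0, 0)).1 := by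
  induction bs with
  | nil => intro j hj; simp at hj
  | cons p t ih =>
    intro j hj i h1 h2
    have hflat : pvFlat (p :: t) = List.replicate p.2.toNat p.1 ++ pvFlat t := by simp [pvFlat]
    cases j with
    | zero =>
      rw [pvPref_zero] at h1
      have h2' : i < p.2 := by
        have := pvPref_cons p t 0
        rw [this, pvPref_zero] at h2; omega
      rw [pvPyGetD_toNat _ _ _ h1, hflat]
      have hlt : i.toNat < p.2.toNat := by omega
      rw [List.getD_eq_getElem?_getD, List.getElem?_append_left (by simpa using hlt)]
      simp [hlt]
    | succ j =>
      have hp : 0 < p.2 := hpos p (by simp)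
      have ht : ∀ q ∈ t, 0 < q.2 := fun q hq => hpos q (by simp [hq])
      have hps : pvPref (p :: t) (j + 1) = p.2 + pvPref t j := pvPref_cons p t j
      have hps2 : pvPref (p :: t) (j + 1 + 1) = p.2 + pvPref t (j + 1) := pvPref_cons p t (j + 1)
      have hpre : 0 ≤ pvPref t j := pvPref_nonneg t ht j
      have hih := ih ht j (by simpa using hj) (i - p.2) (by omega) (by omega)
      rw [pvPyGetD_toNat _ _ _ (by omega), hflat, List.getD_eq_getElem?_getD,
        List.getElem?_append_right (by simp; omega)]
      rw [pvPyGetD_toNat _ _ _ (by omega)] at hih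
      rw [List.getD_eq_getElem?_getD] at hih
      have harg : i.toNat - (List.replicate p.2.toNat p.1).length = (i - p.2).toNat := by
        simp; omega
      rw [harg]
      simpa using hih

theorem pvChainNe (bs : List (Int × Int))
    (hch : List.IsChain (fun p q : Int × Int => p.1 ≠ q.1) bs) :
    ∀ (j : Nat), j + 1 < bs.length → (bs.getD j (0, 0)).1 ≠ (bs.getD (j + 1) (0, 0)).1 := by
  intro j hj
  rw [List.getD_eq_getElem bs (0, 0) (by omega), List.getD_eq_getElem bs (0, 0) hj]
  exact (List.isChain_iff_getElem.mp hch) j hj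

theorem pvCntPos (bs : List (Int × Int)) (hpos : ∀ p ∈ bs, 0 < p.2) (j : Nat) (hj : j < bs.length) :
    0 < (bs.getD j (0, 0)).2 := by
  rw [List.getD_eq_getElem bs (0, 0) hj]
  exact hpos _ (List.getElem_mem _)

theorem pvAL_spec (col : List Int) (bs : List (Int × Int))
    (hpos : ∀ p ∈ bs, 0 < p.2)
    (hcol : ∀ j : Nat, j < bs.length → ∀ i : Int, pvPref bs j ≤ i → i < pvPref bs (j + 1) →
      PySem.List.pyGetD col i 0 = (bs.getD j (0, 0)).1)
    (hne : ∀ j : Nat, j + 1 < bs.length → (bs.getD j (0, 0)).1 ≠ (bs.getD (j + 1) (0, 0)).1)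
    (j : Nat) (hj : j < bs.length) :
    ∀ (k : Nat) (l count : Int), pvPref bs j ≤ l → l < pvPref bs (j + 1) →
      (l - pvPref bs j).toNat = k →
      pvAL col ((bs.getD j (0, 0)).1) l count = (pvPref bs j, count + (l - pvPref bs j)) := by
  intro k
  induction k with
  | zero =>
    intro l count h1 h2 hk
    have hl : l = pvPref bs j := by omega
    have hguard : ¬ (0 < l ∧ PySem.List.pyGetD col (l - 1) 0 = (bs.getD j (0, 0)).1) := by
      rintro ⟨hl0, hcoleq⟩
      cases j with
      | zero => rw [hl, pvPref_zero] at hl0; omega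
      | succ j' =>
        have hsucc := pvPref_succ bs j' (by omega)
        have hcp := pvCntPos bs hpos j' (by omega)
        have hc := hcol j' (by omega) (l - 1) (by omega) (by omega)
        exact hne j' (by omega) (hc.symm.trans hcoleq)
    rw [pvAL, dif_neg hguard, hl]
    simp
  | succ k ih =>
    intro l count h1 h2 hk
    have h1' : pvPref bs j < l := by omega
    have hc := hcol j hj (l - 1) (by omega) (by omega)
    have hnn := pvPref_nonneg bs hpos j
    rw [pvAL, dif_pos ⟨by omega, hc⟩]
    rw [ih (l - 1) (count + 1) (by omega) (by omega) (by omega), Prod.mk.injEq]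
    exact ⟨rfl, by ring⟩

theorem pvAR_spec (col : List Int) (bs : List (Int × Int)) (N : Int)
    (hpos : ∀ p ∈ bs, 0 < p.2)
    (hcol : ∀ j : Nat, j < bs.length → ∀ i : Int, pvPref bs j ≤ i → i < pvPref bs (j + 1) →
      PySem.List.pyGetD col i 0 = (bs.getD j (0, 0)).1)
    (hne : ∀ j : Nat, j + 1 < bs.length → (bs.getD j (0, 0)).1 ≠ (bs.getD (j + 1) (0, 0)).1)
    (hN : N = pvPref bs bs.length)
    (j : Nat) (hj : j < bs.length) :
    ∀ (k : Nat) (r count : Int), pvPref bs j ≤ r → r < pvPref bs (j + 1) →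
      (pvPref bs (j + 1) - 1 - r).toNat = k →
      pvAR col N ((bs.getD j (0, 0)).1) r count
        = (pvPref bs (j + 1) - 1, count + (pvPref bs (j + 1) - 1 - r)) := by
  intro k
  induction k with
  | zero =>
    intro r count h1 h2 hk
    have hr : r = pvPref bs (j + 1) - 1 := by omega
    have hguard : ¬ (r + 1 < N ∧ PySem.List.pyGetD col (r + 1) 0 = (bs.getD j (0, 0)).1) := by
      rintro ⟨hrN, hcoleq⟩
      rcases Nat.lt_or_ge (j + 1) bs.length with hlt | hge
      · have hsucc := pvPref_succ bs (j + 1) hlt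
        have hcp := pvCntPos bs hpos (j + 1) hlt
        have hc := hcol (j + 1) hlt (r + 1) (by omega) (by omega)
        exact hne j hlt (hcoleq.symm.trans hc)
      · have hlen : j + 1 = bs.length := by omega
        rw [hN, ← hlen] at hrN
        omega
    rw [pvAR, dif_neg hguard, hr]
    simp
  | succ k ih =>
    intro r count h1 h2 hk
    have hmono := pvPref_mono bs hpos (j + 1) bs.length hj (le_refl _)
    have hc := hcol j hj (r + 1) (by omega) (by omega)
    rw [pvAR, dif_pos ⟨by omega, hc⟩]
    rw [ih (r + 1) (count + 1) (by omega) (by omega) (by omega), Prod.mk.injEq]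
    exact ⟨rfl, by ring⟩

theorem pvAW_spec (col : List Int) (bs : List (Int × Int)) (N : Int)
    (hpos : ∀ p ∈ bs, 0 < p.2)
    (hcol : ∀ j : Nat, j < bs.length → ∀ i : Int, pvPref bs j ≤ i → i < pvPref bs (j + 1) →
      PySem.List.pyGetD col i 0 = (bs.getD j (0, 0)).1)
    (hne : ∀ j : Nat, j + 1 < bs.length → (bs.getD j (0, 0)).1 ≠ (bs.getD (j + 1) (0, 0)).1)
    (hN : N = pvPref bs bs.length) :
    ∀ (m : Nat) (a b total : Int), -1 ≤ a → a < (bs.length : Int) → 0 ≤ b → b ≤ (bs.length : Int) →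
      (a + 1).toNat = m →
      pvAW col N (pvPref bs (a + 1).toNat - 1) (pvPref bs b.toNat) 0 total 2
        = pvBW bs (bs.length : Int) a b total := by
  intro m
  induction m with
  | zero =>
    intro a b total ha1 ha2 hb1 hb2 hm
    have ha : a = -1 := by omega
    have h0 : (a + 1).toNat = 0 := by omega
    rw [h0, pvPref_zero]
    rw [pvAW, dif_neg (by intro h; omega)]
    rw [pvBW, dif_neg (by intro h; omega)]
  | succ m ih =>
    intro a b total ha1 ha2 hb1 hb2 hm
    have ha0 : 0 ≤ a := by omega
    set ja := a.toNat with hja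
    have hjal : ja < bs.length := by omega
    have hsa : (a + 1).toNat = ja + 1 := by omega
    rw [hsa]
    rcases Int.lt_or_le b (bs.length : Int) with hblt | hble
    · -- b < len
      set jb := b.toNat with hjb
      have hjbl : jb < bs.length := by omega
      have hsuccA := pvPref_succ bs ja hjal
      have hsuccB := pvPref_succ bs jb hjbl
      have hcpA := pvCntPos bs hpos ja hjal
      have hcpB := pvCntPos bs hpos jb hjbl
      have hnnA := pvPref_nonneg bs hpos ja
      have hnnB := pvPref_nonneg bs hpos jb
      have hmonoB := pvPref_mono bs hpos (jb + 1) bs.length hjbl (le_refl _)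
      have hcoll : PySem.List.pyGetD col (pvPref bs (ja + 1) - 1) 0 = (bs.getD ja (0, 0)).1 :=
        hcol ja hjal _ (by omega) (by omega)
      have hcolr : PySem.List.pyGetD col (pvPref bs jb) 0 = (bs.getD jb (0, 0)).1 :=
        hcol jb hjbl _ (by omega) (by omega)
      have hgA : PySem.List.pyGetD bs a (0, 0) = bs.getD ja (0, 0) := pvPyGetD_toNat bs a (0, 0) ha0
      have hgB : PySem.List.pyGetD bs b (0, 0) = bs.getD jb (0, 0) := pvPyGetD_toNat bs b (0, 0) hb1
      by_cases hcc : (bs.getD ja (0, 0)).1 = (bs.getD jb (0, 0)).1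
      · -- colors agree: A takes an outer-loop iteration
        rw [pvAW, dif_pos ⟨by omega, by omega, by rw [hcoll, hcolr, hcc]⟩]
        simp only [hcoll]
        rw [pvAL_spec col bs hpos hcol hne ja hjal (pvPref bs (ja + 1) - 1 - pvPref bs ja).toNat
          _ 2 (by omega) (by omega) rfl]
        rw [hcc]
        rw [pvAR_spec col bs N hpos hcol hne hN jb hjbl
          (pvPref bs (jb + 1) - 1 - pvPref bs jb).toNat _ _ (by omega) (by omega) rfl]
        dsimp only
        by_cases h3 : 3 ≤ (bs.getD ja (0, 0)).2 + (bs.getD jb (0, 0)).2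
        · rw [if_pos (by omega)]
          rw [pvBW, dif_pos ⟨ha0, hblt, by rw [hgA, hgB]; exact hcc, by rw [hgA, hgB]; omega⟩]
          have harg1 : pvPref bs ja - 1 = pvPref bs ((a - 1) + 1).toNat - 1 := by
            congr 2; omega
          have harg2 : pvPref bs (jb + 1) - 1 + 1 = pvPref bs (b + 1).toNat := by
            rw [show (b + 1).toNat = jb + 1 by omega]; ring
          have harg3 : total + (2 + (pvPref bs (ja + 1) - 1 - pvPref bs ja)
              + (pvPref bs (jb + 1) - 1 - pvPref bs jb))
              = total + ((PySem.List.pyGetD bs a (0, 0)).2 + (PySem.List.pyGetD bs b (0, 0)).2) := by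
            rw [hgA, hgB]; omega
          rw [harg1, harg2, harg3,
            ih (a - 1) (b + 1) _ (by omega) (by omega) (by omega) (by omega) (by omega)]
        · rw [if_neg (by omega)]
          rw [pvBW, dif_neg (by rw [hgA, hgB]; intro h; omega)]
      · -- colors differ: both loops stop
        rw [pvAW, dif_neg (by rw [hcoll, hcolr]; intro h; exact hcc h.2.2)]
        rw [pvBW, dif_neg (by rw [hgA, hgB]; intro h; exact hcc h.2.2.1)]
    · -- b = len: right edge
      have hbe : b.toNat = bs.length := by omega
      rw [pvAW, dif_neg (by rw [hbe, ← hN]; intro h; omega)]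
      rw [pvBW, dif_neg (by intro h; omega)]

theorem pvAW_init (col : List Int) (bs : List (Int × Int)) (N : Int)
    (hpos : ∀ p ∈ bs, 0 < p.2)
    (hcol : ∀ j : Nat, j < bs.length → ∀ i : Int, pvPref bs j ≤ i → i < pvPref bs (j + 1) →
      PySem.List.pyGetD col i 0 = (bs.getD j (0, 0)).1)
    (hne : ∀ j : Nat, j + 1 < bs.length → (bs.getD j (0, 0)).1 ≠ (bs.getD (j + 1) (0, 0)).1)
    (hN : N = pvPref bs bs.length)
    (j : Nat) (hj : j < bs.length) (i : Int)
    (h1 : pvPref bs j ≤ i) (h2 : i < pvPref bs (j + 1)) :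
    pvAW col N i i 1 0 1
      = if 2 ≤ (bs.getD j (0, 0)).2 then
          pvBW bs (bs.length : Int) ((j : Int) - 1) ((j : Int) + 1) ((bs.getD j (0, 0)).2)
        else 0 := by
  have hci : PySem.List.pyGetD col i 0 = (bs.getD j (0, 0)).1 := hcol j hj i h1 h2
  have hnn := pvPref_nonneg bs hpos j
  have hsucc := pvPref_succ bs j hj
  have hcp := pvCntPos bs hpos j hj
  have hmono := pvPref_mono bs hpos (j + 1) bs.length hj (le_refl _)
  rw [pvAW, dif_pos ⟨by omega, by omega, rfl⟩]
  simp only [hci]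
  rw [pvAL_spec col bs hpos hcol hne j hj (i - pvPref bs j).toNat i 1 h1 h2 rfl]
  rw [pvAR_spec col bs N hpos hcol hne hN j hj (pvPref bs (j + 1) - 1 - i).toNat i _
    h1 h2 rfl]
  dsimp only
  have hc2 : 1 + (i - pvPref bs j) + (pvPref bs (j + 1) - 1 - i) = (bs.getD j (0, 0)).2 := by
    omega
  rw [hc2]
  by_cases h3 : 2 ≤ (bs.getD j (0, 0)).2
  · rw [if_pos (by omega), if_pos h3]
    have harg1 : pvPref bs j - 1 = pvPref bs (((j : Int) - 1) + 1).toNat - 1 := by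
      congr 2; omega
    have harg2 : pvPref bs (j + 1) - 1 + 1 = pvPref bs ((j : Int) + 1).toNat := by
      rw [show ((j : Int) + 1).toNat = j + 1 by omega]; ring
    have harg3 : 0 + (bs.getD j (0, 0)).2 = (bs.getD j (0, 0)).2 := by ring
    rw [harg1, harg2, harg3,
      pvAW_spec col bs N hpos hcol hne hN (((j : Int) - 1) + 1).toNat ((j : Int) - 1)
        ((j : Int) + 1) _ (by omega) (by omega) (by omega) (by omega) rfl]
  · rw [if_neg (by omega), if_neg h3]

theorem pvFoldB_ge (bs : List (Int × Int)) (M C : Int) (l : List Int) :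
    ∀ ans : Int, ans ≤ l.foldl
      (fun ans j =>
        let p := PySem.List.pyGetD bs j (0, 0)
        if p.1 = C ∧ 2 ≤ p.2 then max ans (pvBW bs M (j - 1) (j + 1) p.2) else ans) ans := by
  induction l with
  | nil => intro ans; simp
  | cons x l ih =>
    intro ans
    rw [List.foldl_cons]
    refine le_trans ?_ (ih _)
    dsimp only
    split
    · exact le_max_left _ _
    · exact le_refl _

theorem pvFold_const (col : List Int) (N C c V t : Int) :
    ∀ (k : Nat) (s ans : Int), s < t → (t - s).toNat = k →
      (∀ i : Int, s ≤ i → i < t →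
        PySem.List.pyGetD col i 0 = c ∧ pvAW col N i i 1 0 1 = V) →
      (PySem.List.pyRange s t 1).foldl
        (fun ans i =>
          if PySem.List.pyGetD col i 0 = C then max ans (pvAW col N i i 1 0 1) else ans) ans
        = if c = C then max ans V else ans := by
  intro k
  induction k with
  | zero => intro s ans hst hk _; omega
  | succ k ih =>
    intro s ans hst hk hcv
    rw [PySem.List.pyRange_one_cons hst, List.foldl_cons]
    obtain ⟨hcs, hvs⟩ := hcv s (le_refl s) hst
    have hstep : (if PySem.List.pyGetD col s 0 = C then max ans (pvAW col N s s 1 0 1) else ans)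
        = if c = C then max ans V else ans := by
      rw [hcs, hvs]
    rw [hstep]
    rcases Int.lt_or_le (s + 1) t with h1 | h1
    · rw [ih (s + 1) _ h1 (by omega) (fun i hi1 hi2 => hcv i (by omega) hi2)]
      by_cases hcC : c = C
      · rw [if_pos hcC, if_pos hcC]
        omega
      · rw [if_neg hcC, if_neg hcC]
    · rw [PySem.List.pyRange_one_eq_nil (by omega), List.foldl_nil]

theorem pvRLE_pos (cs : List Int) : ∀ p ∈ pvRLE cs, 0 < p.2 := by
  cases cs with
  | nil => intro p hp; simp [pvRLE] at hp
  | cons x xs => exact pvGo_pos xs x 1 (by omega)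

theorem pvRLE_flat (cs : List Int) : pvFlat (pvRLE cs) = cs := by
  cases cs with
  | nil => simp [pvRLE, pvFlat]
  | cons x xs =>
    rw [pvRLE, pvGo_flat xs x 1 (by omega)]
    simp

theorem pvRLE_chain (cs : List Int) :
    List.IsChain (fun p q : Int × Int => p.1 ≠ q.1) (pvRLE cs) := by
  cases cs with
  | nil => simp [pvRLE]
  | cons x xs => exact pvGo_chain xs x 1

theorem pvGetD_take (col : List Int) (n : Nat) (i : Int) (h0 : 0 ≤ i)
    (h1 : i.toNat < (col.take n).length) :
    PySem.List.pyGetD col i 0 = PySem.List.pyGetD (col.take n) i 0 := by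
  have h2 : i.toNat < col.length := by
    have := List.length_take (l := col) (i := n)
    omega
  rw [pvPyGetD_toNat _ _ _ h0, pvPyGetD_toNat _ _ _ h0,
    List.getD_eq_getElem _ _ h1, List.getD_eq_getElem _ _ h2]
  exact (List.getElem_take).symm

theorem pvFold_blocks (col : List Int) (bs : List (Int × Int)) (N C : Int)
    (hpos : ∀ p ∈ bs, 0 < p.2)
    (hcol : ∀ j : Nat, j < bs.length → ∀ i : Int, pvPref bs j ≤ i → i < pvPref bs (j + 1) →
      PySem.List.pyGetD col i 0 = (bs.getD j (0, 0)).1)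
    (hne : ∀ j : Nat, j + 1 < bs.length → (bs.getD j (0, 0)).1 ≠ (bs.getD (j + 1) (0, 0)).1)
    (hN : N = pvPref bs bs.length) :
    ∀ (m : Nat), m ≤ bs.length → ∀ ans : Int, 0 ≤ ans →
      (PySem.List.pyRange 0 (pvPref bs m) 1).foldl
        (fun ans i =>
          if PySem.List.pyGetD col i 0 = C then max ans (pvAW col N i i 1 0 1) else ans) ans
      = (PySem.List.pyRange 0 (m : Int) 1).foldl
          (fun ans j =>
            let p := PySem.List.pyGetD bs j (0, 0)
            if p.1 = C ∧ 2 ≤ p.2 then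
              max ans (pvBW bs (bs.length : Int) (j - 1) (j + 1) p.2)
            else ans) ans := by
  intro m
  induction m with
  | zero =>
    intro _ ans _
    rw [pvPref_zero]
    rw [PySem.List.pyRange_one_eq_nil (by omega), PySem.List.pyRange_one_eq_nil (by omega),
      List.foldl_nil, List.foldl_nil]
  | succ m ih =>
    intro hm ans hans
    have hsucc := pvPref_succ bs m (by omega)
    have hcp := pvCntPos bs hpos m (by omega)
    have hnn := pvPref_nonneg bs hpos m
    rw [PySem.List.pyRange_one_append 0 (pvPref bs m) (pvPref bs (m + 1)) (by omega) (by omega),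
      List.foldl_append, ih (by omega) ans hans]
    have hcast : ((m + 1 : Nat) : Int) = (m : Int) + 1 := by push_cast; ring
    rw [hcast, PySem.List.pyRange_one_succ_right (by omega), List.foldl_append, List.foldl_cons,
      List.foldl_nil]
    set ans1 := (PySem.List.pyRange 0 (m : Int) 1).foldl
      (fun ans j =>
        let p := PySem.List.pyGetD bs j (0, 0)
        if p.1 = C ∧ 2 ≤ p.2 then
          max ans (pvBW bs (bs.length : Int) (j - 1) (j + 1) p.2)
        else ans) ans with hans1
    have hans1ge : 0 ≤ ans1 := le_trans hans (pvFoldB_ge bs (bs.length : Int) C _ ans)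
    have hgm : PySem.List.pyGetD bs (m : Int) (0, 0) = bs.getD m (0, 0) :=
      pvPyGetD_toNat bs (m : Int) (0, 0) (by omega)
    rw [pvFold_const col N C ((bs.getD m (0, 0)).1)
        (if 2 ≤ (bs.getD m (0, 0)).2 then
          pvBW bs (bs.length : Int) ((m : Int) - 1) ((m : Int) + 1) ((bs.getD m (0, 0)).2)
        else 0)
        (pvPref bs (m + 1)) (pvPref bs (m + 1) - pvPref bs m).toNat (pvPref bs m) ans1
        (by omega) rfl
        (fun i hi1 hi2 => ⟨hcol m (by omega) i hi1 hi2,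
          pvAW_init col bs N hpos hcol hne hN m (by omega) i hi1 hi2⟩)]
    dsimp only
    rw [hgm]
    by_cases hC : (bs.getD m (0, 0)).1 = C
    · by_cases h2 : 2 ≤ (bs.getD m (0, 0)).2
      · rw [if_pos hC, if_pos h2, if_pos ⟨hC, h2⟩]
      · rw [if_pos hC, if_neg h2, if_neg (by intro h; exact h2 h.2)]
        omega
    · rw [if_neg hC, if_neg (by intro h; exact hC h.1)]

theorem pvMain (N K C : Int) (col : List Int) (hpre : N ≤ (col.length : Int)) :
    maxBoxes N K C col = maxBoxes_alt N K C col := by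
  rcases Int.lt_or_le 0 N with hN0 | hN0
  · -- positive N
    have hmax : max N 0 = N := by omega
    have htake : N.toNat ≤ col.length := by omega
    set cs := col.take N.toNat with hcs
    set bs := pvRLE cs with hbs
    have hcs_len : cs.length = N.toNat := by
      rw [hcs, List.length_take]; omega
    have hpos : ∀ p ∈ bs, 0 < p.2 := pvRLE_pos cs
    have hflat : pvFlat bs = cs := pvRLE_flat cs
    have hN' : N = pvPref bs bs.length := by
      rw [← pvFlat_length bs hpos, hflat, hcs_len]; omega
    have hne : ∀ j : Nat, j + 1 < bs.length →
        (bs.getD j (0, 0)).1 ≠ (bs.getD (j + 1) (0, 0)).1 :=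
      pvChainNe bs (pvRLE_chain cs)
    have hcol : ∀ j : Nat, j < bs.length → ∀ i : Int, pvPref bs j ≤ i → i < pvPref bs (j + 1) →
        PySem.List.pyGetD col i 0 = (bs.getD j (0, 0)).1 := by
      intro j hj i h1 h2
      have hnn := pvPref_nonneg bs hpos j
      have hmono := pvPref_mono bs hpos (j + 1) bs.length hj (le_refl _)
      have hib : i.toNat < cs.length := by omega
      rw [pvGetD_take col N.toNat i (by omega) (by rw [← hcs]; exact hib), ← hcs, ← hflat]
      exact pvPosColor bs hpos j hj i h1 h2
    have hblocks :
        (let st := cs.foldl pvRLEStep ([], 0, 0);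
         if 0 < st.2.2 then st.1 ++ [(st.2.1, st.2.2)] else st.1) = bs := pvBlocks_eq cs
    rw [maxBoxes, maxBoxes_alt]
    simp only [hmax, PySem.List.slice_to col (by omega : (0:Int) ≤ N), ← hcs]
    simp only [hblocks]
    have H := pvFold_blocks col bs N C hpos hcol hne hN' bs.length (le_refl _) 0 (le_refl 0)
    rw [← hN'] at H
    exact H
  · -- N ≤ 0 : both sides are 0
    have hmax : max N 0 = 0 := by omega
    rw [maxBoxes, maxBoxes_alt]
    simp only [hmax, PySem.List.slice_to col (le_refl (0:Int))]
    rw [PySem.List.pyRange_one_eq_nil hN0, List.foldl_nil]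
    simp [PySem.List.pyRange_one_eq_nil]

-- ===== VERDICT (by name: the statement is the Claim_ definition above) =====
theorem maxBoxes_spec : Claim_equal_maxBoxes := by
  intro N K C col _ hpre
  unfold Spec_maxBoxes
  exact pvMain N K C col hpre
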